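-- pv_equiv track=rewrite | github.com/Kamran-360/Information-Retrieval-System | main.py | merge_and_fFrequency
-- ===== SOURCE A (Python) =====
-- def merge_and_fFrequency(f):
--     """Making a dict contianing all the words of file lists with their
--     frequency and sorting them and assigning them a unique ID"""
--     mergedlist=list()
--     for i in f:
--         mergedlist = mergedlist + i
--     d=dict()
--     for word in mergedlist:
--         if word in d:
--             d[word] += 1
--             continue
--         d[word] = 1
--     sorted_dic = {k: v for k,v in sorted(d.items())}
--     return  sorted_dic
-- ===== SOURCE B (Python) =====
-- def merge_and_fFrequency(f):
--     # Flatten once, sort the flat word list, then run-length-scan adjacent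
--     # equal words: each run gives one dict entry, already in sorted key order.
--     flat = sorted(w for sub in f for w in sub)
--     out = {}
--     i = 0
--     n = len(flat)
--     while i < n:
--         j = i
--         while j < n and flat[j] == flat[i]:
--             j += 1
--         out[flat[i]] = j - i
--         i = j
--     return out
-- ===== Notes on version B (the rewrite author's own statement) =====
-- stated objective: faster
-- what changed: Replaces A's quadratic list re-concatenation plus dict-counting plus a separate sort of the items by a single flatten, one sort of the flat word list, and a run-length scan over adjacent equal words that emits the sorted dict directly.
import Mathlib
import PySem

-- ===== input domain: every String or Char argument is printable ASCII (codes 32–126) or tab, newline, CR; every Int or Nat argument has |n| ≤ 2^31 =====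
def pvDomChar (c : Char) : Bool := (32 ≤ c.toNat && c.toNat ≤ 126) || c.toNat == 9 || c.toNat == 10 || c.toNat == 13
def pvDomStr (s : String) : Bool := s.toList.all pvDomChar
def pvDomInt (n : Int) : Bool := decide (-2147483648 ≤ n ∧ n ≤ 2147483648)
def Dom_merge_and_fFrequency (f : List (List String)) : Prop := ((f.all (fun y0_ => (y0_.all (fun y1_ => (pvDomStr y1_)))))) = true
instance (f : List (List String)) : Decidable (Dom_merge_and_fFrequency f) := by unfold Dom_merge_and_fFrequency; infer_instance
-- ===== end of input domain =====

-- B replaces A's repeated list re-concatenation, dict counting and separate item sort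
-- by flatten + one sort + a run-length scan over adjacent equal words.
-- The returned dict is the association list of (word, frequency) in sorted key order.

-- ===== PORT A =====
def merge_and_fFrequency (f : List (List String)) : List (String × Int) :=
  -- mergedlist = []; for i in f: mergedlist = mergedlist + i
  let mergedlist := f.foldl (fun acc i => acc ++ i) []
  -- d = {}; for word in mergedlist: if word in d: d[word] += 1 else d[word] = 1
  let d := mergedlist.foldl
    (fun d word =>
      if d.contains word then d.insert word (d.getD word 0 + 1)
      else d.insert word 1)
    (PySem.Dict.empty : PySem.Dict String Int)
  -- sorted_dic = {k: v for k, v in sorted(d.items())}  (tuples compare lexicographically)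
  let sorted_items := PySem.List.sorted2 d.items (fun p => p.1) (fun p => p.2)
  (sorted_items.foldl (fun sd p => sd.insert p.1 p.2)
    (PySem.Dict.empty : PySem.Dict String Int)).items

-- ===== PORT B =====
-- the while-loop of Source B: scan the sorted flat list, one (word, run length) entry per run;
-- every key is fresh, so the dict Source B builds IS this list of entries in scan order
def pvRuns : List String → List (String × Int)
  | [] => []
  | x :: xs =>
    (x, ((xs.takeWhile (· == x)).length : Int) + 1) :: pvRuns (xs.dropWhile (· == x))
  termination_by s => s.length
  decreasing_by
    have := List.length_dropWhile_le (p := (· == x)) (l := xs)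
    simp; omega

def merge_and_fFrequency_alt (f : List (List String)) : List (String × Int) :=
  pvRuns (PySem.List.sorted (f.flatMap id) (fun w => w))

-- ===== PRECONDITION & SPEC =====
def Spec_merge_and_fFrequency (f : List (List String)) (out : List (String × Int)) : Prop := out = merge_and_fFrequency_alt f
instance (f : List (List String)) (out : List (String × Int)) : Decidable (Spec_merge_and_fFrequency f out) := by unfold Spec_merge_and_fFrequency; infer_instance

-- ===== CLAIM (what is proved, stated in full; the proofs are below) =====
def Claim_equal_merge_and_fFrequency : Prop := ∀ (f : List (List String)), Dom_merge_and_fFrequency f → Spec_merge_and_fFrequency f (merge_and_fFrequency f)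

-- ===== LEMMAS AND PROOFS =====

-- the common normal form both programs reach: keys strictly increasing, values the counts
def pvTarget (L : List String) : List (String × Int) :=
  (PySem.List.sorted (PySem.Set.ofList L) (fun k => k)).map (fun k => (k, (L.count k : Int)))

theorem pv_insertBy_congr {α : Type} (b1 b2 : α → α → Bool) (x : α) (ys : List α)
    (h : ∀ y ∈ ys, b1 x y = b2 x y) :
    PySem.List.insertBy b1 x ys = PySem.List.insertBy b2 x ys := by
  induction ys with
  | nil => rfl
  | cons y ys ih =>
    rw [PySem.List.insertBy.eq_2, PySem.List.insertBy.eq_2, h y (by simp)]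
    split_ifs with hb
    · rfl
    · rw [ih (fun z hz => h z (by simp [hz]))]

theorem pv_foldl_insertBy_congr {α : Type} (b1 b2 : α → α → Bool) (xs : List α) :
    ∀ (acc : List α), (∀ a ∈ xs, ∀ c, (c ∈ acc ∨ c ∈ xs) → b1 a c = b2 a c) →
    xs.foldl (fun acc x => PySem.List.insertBy b1 x acc) acc
      = xs.foldl (fun acc x => PySem.List.insertBy b2 x acc) acc := by
  induction xs with
  | nil => intro acc h; rfl
  | cons x xs ih =>
    intro acc h
    simp only [List.foldl_cons]
    rw [pv_insertBy_congr b1 b2 x acc (fun y hy => h x (by simp) y (Or.inl hy))]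
    apply ih
    intro a ha c hc
    rcases hc with hc | hc
    · rcases (PySem.List.insertBy_mem_iff b2 x c acc).mp hc with rfl | hc
      · exact h a (by simp [ha]) c (Or.inr (by simp))
      · exact h a (by simp [ha]) c (Or.inl hc)
    · exact h a (by simp [ha]) c (Or.inr (by simp [hc]))

-- on pairs whose first components determine the pairs, Python's tuple sort is a sort by fst
theorem pv_sorted2_eq_sorted_fst (xs : List (String × Int))
    (h : ∀ a ∈ xs, ∀ c ∈ xs, a.1 = c.1 → a = c) :
    PySem.List.sorted2 xs (fun p => p.1) (fun p => p.2)
      = PySem.List.sorted xs (fun p => p.1) := by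
  rw [PySem.List.sorted_eq_foldl_insertBy]
  simp only [PySem.List.sorted2]
  simp only [if_neg (by decide : ¬ (false = true))]
  apply pv_foldl_insertBy_congr
  intro a ha c hc
  rcases hc with hc | hc
  · simp at hc
  · rcases lt_trichotomy a.1 c.1 with hlt | heq | hgt
    · simp [hlt]
    · have : a = c := h a ha c hc heq
      subst this
      simp
    · simp [hgt, not_lt.mpr (le_of_lt hgt)]

-- A's counting loop is collections.Counter
theorem pv_dict_loop_eq_counter (l : List String) :
    l.foldl
      (fun d word =>
        if d.contains word then d.insert word (d.getD word 0 + 1)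
        else d.insert word 1)
      (PySem.Dict.empty : PySem.Dict String Int) = PySem.Dict.counter l := by
  rw [PySem.Dict.counter_eq_foldl]
  apply PySem.List.foldl_congr_mem
  intro acc x hx
  by_cases hc : acc.contains x
  · simp [PySem.Dict.modify, hc]
  · simp [PySem.Dict.modify, PySem.Dict.getD_of_not_contains acc 0 (by simpa using hc), hc]

theorem pv_discard_of_not_mem {α : Type} [BEq α] [LawfulBEq α] (s : PySem.Set α) (x : α)
    (h : x ∉ s) : PySem.Set.discard s x = s := by
  simp only [PySem.Set.discard]
  rw [List.filter_eq_self]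
  intro y hy
  simp only [Bool.not_eq_eq_eq_not, Bool.not_true, beq_eq_false_iff_ne]
  exact fun he => h (he ▸ hy)

theorem pv_ofList_run (x : String) (t r : List String)
    (ht : ∀ y ∈ t, y = x) (hr : x ∉ r) :
    PySem.Set.ofList (x :: (t ++ r)) = x :: PySem.Set.ofList r := by
  induction t with
  | nil =>
    rw [List.nil_append, PySem.Set.ofList_cons,
      pv_discard_of_not_mem _ x (by simpa [PySem.Set.mem_ofList] using hr)]
  | cons y t ih =>
    have hy : y = x := ht y (by simp)
    subst hy
    rw [List.cons_append, PySem.Set.ofList_cons, PySem.Set.ofList_cons]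
    rw [PySem.Set.ofList_cons] at ih
    have ih' := ih (fun z hz => ht z (by simp [hz]))
    have hinj : (PySem.Set.ofList (t ++ r)).discard y = PySem.Set.ofList r := by
      injection ih'
    rw [hinj]
    simp [PySem.Set.discard]
    exact fun z hz he => hr (he ▸ hz)

theorem pv_ofList_sublist {α : Type} [BEq α] [LawfulBEq α] (xs : List α) :
    (PySem.Set.ofList xs).Sublist xs := by
  induction xs with
  | nil => simp
  | cons x xs ih =>
    rw [PySem.Set.ofList_cons]
    simp only [PySem.Set.discard]
    exact (List.cons_sublist_cons).mpr ((List.filter_sublist).trans ih)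

-- the run-length scan of a ≤-sorted list yields (distinct words, their counts)
theorem pv_runs_of_sorted (s : List String) (hs : s.Pairwise (· ≤ ·)) :
    pvRuns s = (PySem.Set.ofList s).map (fun k => (k, (s.count k : Int))) := by
  induction s using pvRuns.induct with
  | case1 => simp [pvRuns]
  | case2 x xs ih =>
    have hxs : xs.Pairwise (· ≤ ·) := (List.pairwise_cons.mp hs).2
    have hxle : ∀ y ∈ xs, x ≤ y := (List.pairwise_cons.mp hs).1
    set t := xs.takeWhile (· == x) with hts
    set r := xs.dropWhile (· == x) with hrs
    have htx : ∀ y ∈ t, y = x := fun y hy => by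
      simpa using List.mem_takeWhile_imp hy
    have hsplit : t ++ r = xs := List.takeWhile_append_dropWhile
    have hrsub : r.Sublist xs := List.dropWhile_sublist _
    have hrp : r.Pairwise (· ≤ ·) := hxs.sublist hrsub
    have hxr : x ∉ r := by
      cases hr0 : r with
      | nil => simp
      | cons y0 r' =>
        have hy0 : (y0 == x) = false := by
          have := List.head?_dropWhile_not (· == x) xs
          rw [← hrs, hr0] at this
          simpa using this
        have hy0x : y0 ≠ x := by simpa using hy0
        intro hmem
        rcases List.mem_cons.mp hmem with rfl | hmem'
        · exact hy0x rfl
        · have h1 : y0 ≤ x := by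
            rw [hr0] at hrp
            exact (List.pairwise_cons.mp hrp).1 x hmem'
          have h2 : x ≤ y0 := hxle y0 (hrsub.mem (by rw [hr0]; simp))
          exact hy0x (le_antisymm h1 h2)
    have hcount_x : (x :: xs).count x = t.length + 1 := by
      rw [← hsplit, List.count_cons_self, List.count_append]
      rw [List.count_eq_length.mpr (fun b hb => (htx b hb).symm),
        List.count_eq_zero.mpr hxr]
    have hof : PySem.Set.ofList (x :: xs) = x :: PySem.Set.ofList r := by
      rw [← hsplit]; exact pv_ofList_run x t r htx hxr
    rw [pvRuns, ih hrp, hof, List.map_cons, hcount_x]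
    congr 1
    apply List.map_congr_left
    intro k hk
    have hkr : k ∈ r := (PySem.Set.mem_ofList r k).mp hk
    have hkx : k ≠ x := fun he => hxr (he ▸ hkr)
    have hkt : k ∉ t := fun hkt => hkx (htx k hkt)
    have : (x :: xs).count k = r.count k := by
      rw [← hsplit]
      simp [List.count_cons, List.count_append, List.count_eq_zero.mpr hkt]
      exact fun he => hkx he.symm
    rw [this]

theorem pv_ofList_sorted (l : List String) :
    PySem.Set.ofList (PySem.List.sorted l (fun k => k))
      = PySem.List.sorted (PySem.Set.ofList l) (fun k => k) := by
  apply Eq.symm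
  apply PySem.List.sorted_eq_of_perm_of_pairwise_lt
  · rw [List.perm_ext_iff_of_nodup (PySem.Set.nodup_ofList _) (PySem.Set.nodup_ofList _)]
    intro a
    rw [PySem.Set.mem_ofList, PySem.Set.mem_ofList, PySem.List.mem_sorted]
  · have hle : (PySem.Set.ofList (PySem.List.sorted l (fun k => k))).Pairwise (· ≤ ·) :=
      (PySem.List.sorted_pairwise l (fun k => k)).sublist (pv_ofList_sublist _)
    have hne : (PySem.Set.ofList (PySem.List.sorted l (fun k => k))).Pairwise (· ≠ ·) :=
      PySem.Set.nodup_ofList _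
    exact (hle.and hne).imp (fun h => lt_of_le_of_ne h.1 h.2)

theorem pv_target_pairwise (L : List String) :
    (pvTarget L).Pairwise (fun a b => a.1 < b.1) := by
  apply List.Pairwise.map
  · exact fun a b h => h
  · exact PySem.List.sorted_ofList_pairwise_lt L

theorem pv_A_eq_target (f : List (List String)) :
    merge_and_fFrequency f = pvTarget f.flatten := by
  dsimp only [merge_and_fFrequency]
  rw [PySem.List.foldl_append_eq_flatten, List.nil_append,
    pv_dict_loop_eq_counter, pv_sorted2_eq_sorted_fst]
  · rw [PySem.List.sorted_eq_of_perm_of_pairwise_lt _ (pvTarget f.flatten) (fun p => p.1)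
      (by
        rw [PySem.Dict.items_counter]
        exact (PySem.List.sorted_perm (PySem.Set.ofList f.flatten) (fun k => k) false).map _)
      (pv_target_pairwise _)]
    rw [PySem.Dict.items_foldl_insert_fresh (l := pvTarget f.flatten)
      (k := fun p => p.1) (v := fun p => p.2) (d := PySem.Dict.empty)
      (fun a _ => PySem.Dict.contains_empty _)
      (by
        have : (pvTarget f.flatten).map (fun p => p.1)
            = PySem.List.sorted (PySem.Set.ofList f.flatten) (fun k => k) := by
          simp [pvTarget, List.map_map, Function.comp_def]
        rw [this]
        exact ((PySem.List.sorted_ofList_pairwise_lt f.flatten).imp ne_of_lt))]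
    simp [PySem.Dict.empty]
  · intro a ha c hc he
    rw [PySem.Dict.items_counter] at ha hc
    rcases List.mem_map.mp ha with ⟨k1, _, rfl⟩
    rcases List.mem_map.mp hc with ⟨k2, _, rfl⟩
    simp at he ⊢
    exact ⟨he, he ▸ rfl⟩

theorem pv_B_eq_target (f : List (List String)) :
    merge_and_fFrequency_alt f = pvTarget f.flatten := by
  unfold merge_and_fFrequency_alt
  rw [List.flatMap_id]
  rw [pv_runs_of_sorted _ (PySem.List.sorted_pairwise f.flatten (fun w => w)),
    pv_ofList_sorted]
  unfold pvTarget
  apply List.map_congr_left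
  intro k hk
  have := (PySem.List.sorted_perm f.flatten (fun w => w) false).count_eq k
  rw [this]

-- ===== VERDICT (by name: the statement is the Claim_ definition above) =====
theorem merge_and_fFrequency_spec : Claim_equal_merge_and_fFrequency := by
  intro f _
  unfold Spec_merge_and_fFrequency
  rw [pv_A_eq_target, pv_B_eq_target]
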